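-- pv_equiv track=rewrite | github.com/aa694849243/leetcode_cj | LCP 58. 积木拼接.py | composeCube
-- ===== SOURCE A (Python) =====
-- import itertools
-- from typing import List
--
-- def composeCube(shapes: List[List[str]]) -> bool:
--     n = len(shapes[0])
--
--     def cal(shape):  # 计算每个形状的空间占用情况,6个面，4个方向，两次翻转
--         res = [0] * 48
--         for x, y in itertools.product(range(n), range(n)):
--             if shape[x][y] != "1":
--                 continue
--             for turn, (xt, yt) in enumerate([(x, y), (x, n - 1 - y)]):  # 上下翻转
--                 for rotate, (xr, yr) in enumerate([(xt, yt), (yt, n - 1 - xt), (n - 1 - xt, n - 1 - yt), (n - 1 - yt, xt)]):  # 中心旋转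
--                     for side, (xs, ys, zs) in enumerate(
--                             [(xr, yr, 0), (xr, yr, n - 1), (xr, 0, yr), (xr, n - 1, yr), (0, xr, yr), (n - 1, xr, yr)]):
--                         res[turn * 24 + rotate * 6 + side] |= 1 << (xs * n * n + ys * n + zs)
--         return res
--
--     sum_ = 2 * n * n + 2 * n * (n - 2) + 2 * (n - 2) * (n - 2)
--     if sum(''.join(shape).count("1") for shape in shapes) != sum_:
--         return False
--     first = cal(shapes[0])
--     dp = {first[0], first[24]}  # 第一个积木可以任意摆放，考虑正反两面
--     for shape in shapes[1:]:
--         dp = {pre | aft for pre in dp for aft in cal(shape) if pre & aft == 0}  # 两个积木的空间占用不能重叠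
--     return len(dp) > 0
-- ===== SOURCE B (Python) =====
-- def composeCube(shapes):
--     n = len(shapes[0])
--
--     def cal(shape):  # same orientation encoding as the original
--         res = [0] * 48
--         for x in range(n):
--             for y in range(n):
--                 if shape[x][y] != "1":
--                     continue
--                 for turn, (xt, yt) in enumerate([(x, y), (x, n - 1 - y)]):
--                     for rotate, (xr, yr) in enumerate([(xt, yt), (yt, n - 1 - xt), (n - 1 - xt, n - 1 - yt), (n - 1 - yt, xt)]):
--                         for side, (xs, ys, zs) in enumerate(
--                                 [(xr, yr, 0), (xr, yr, n - 1), (xr, 0, yr), (xr, n - 1, yr), (0, xr, yr), (n - 1, xr, yr)]):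
--                             res[turn * 24 + rotate * 6 + side] |= 1 << (xs * n * n + ys * n + zs)
--         return res
--
--     target = 2 * n * n + 2 * n * (n - 2) + 2 * (n - 2) * (n - 2)
--     if sum("".join(shape).count("1") for shape in shapes) != target:
--         return False
--     first = cal(shapes[0])
--
--     def dfs(blocks, mask):  # backtracking: one running mask, one choice per remaining block
--         if not blocks:
--             return True
--         return any(mask & o == 0 and dfs(blocks[1:], mask | o) for o in cal(blocks[0]))
--
--     return any(0 & o == 0 and dfs(shapes[1:], 0 | o) for o in (first[0], first[24]))
-- ===== Notes on version B (the rewrite author's own statement) =====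
-- stated objective: alternative
-- what changed: The breadth-first set-DP over all reachable occupancy masks is replaced by depth-first backtracking that keeps a single running mask and one choice per remaining block, recursing over the block list instead of maintaining a growing set of masks.
-- outside the precondition, e.g. on composeCube([['1'], ['10', '00'], []]): A returns False, B returns False
import Mathlib
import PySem

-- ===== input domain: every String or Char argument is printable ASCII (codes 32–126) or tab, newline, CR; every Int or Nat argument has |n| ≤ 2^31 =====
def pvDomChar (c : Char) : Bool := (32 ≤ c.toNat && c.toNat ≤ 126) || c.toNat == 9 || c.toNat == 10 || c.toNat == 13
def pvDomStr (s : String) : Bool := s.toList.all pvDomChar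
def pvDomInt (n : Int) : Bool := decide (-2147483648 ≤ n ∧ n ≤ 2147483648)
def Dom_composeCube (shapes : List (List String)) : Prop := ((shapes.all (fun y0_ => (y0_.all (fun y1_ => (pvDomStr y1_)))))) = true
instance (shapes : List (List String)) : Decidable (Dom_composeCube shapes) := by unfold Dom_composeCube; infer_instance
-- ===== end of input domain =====

-- B replaces the breadth-first set-DP over reachable occupancy masks by depth-first
-- backtracking with a single running mask (objective: alternative algorithm, same result).

-- shared helper: the orientation encoding cal() of the Python (identical in A and B):
-- for one set cell (x,y), the 48 (index, bit) contributions
def pvCalEntry (n x y : Nat) : List (Nat × Nat) :=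
  (List.zipIdx [(x, y), (x, n - 1 - y)]).flatMap (fun t =>
    let xt := t.1.1; let yt := t.1.2; let turn := t.2
    (List.zipIdx [(xt, yt), (yt, n - 1 - xt), (n - 1 - xt, n - 1 - yt), (n - 1 - yt, xt)]).flatMap (fun r =>
      let xr := r.1.1; let yr := r.1.2; let rot := r.2
      (List.zipIdx [(xr, yr, (0 : Nat)), (xr, yr, n - 1), (xr, 0, yr), (xr, n - 1, yr),
                    (0, xr, yr), (n - 1, xr, yr)]).map (fun s =>
        (turn * 24 + rot * 6 + s.2, 1 <<< (s.1.1 * n * n + s.1.2.1 * n + s.1.2.2)))))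

-- cal(shape): res = [0]*48; for x,y in product(range(n),range(n)): if shape[x][y]=='1',
-- OR the bit into the 48 orientation masks (indices always 0..47, so pySetD/pyGetD are exact)
def pvCal (n : Nat) (shape : List String) : List Nat :=
  (List.range n).foldl (fun res (x : Nat) =>
    (List.range n).foldl (fun res (y : Nat) =>
      if ((PySem.List.pyGet? shape (x : Int)).bind
            (fun row => PySem.Str.pyGet? row (y : Int))) ≠ some '1' then res
      else
        (pvCalEntry n x y).foldl (fun res ib =>
          PySem.List.pySetD res (ib.1 : Int) (PySem.List.pyGetD res (ib.1 : Int) 0 ||| ib.2)) res) res)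
    (List.replicate 48 0)

-- ===== PORT A =====
def composeCube (shapes : List (List String)) : Bool :=
  match shapes with
  | [] => false     -- shapes[0] raises IndexError: outside Pre_
  | s0 :: rest =>
    let n := s0.length
    let target : Int := 2 * n * n + 2 * n * ((n : Int) - 2) + 2 * ((n : Int) - 2) * ((n : Int) - 2)
    -- ''.join(shape).count("1"): exact since the pattern is a single character
    let ones : Int := (s0 :: rest).foldl
      (fun acc sh => acc + ((sh.map String.toList).flatten.count '1' : Int)) 0
    if ones ≠ target then false
    else
      let first := pvCal n s0
      let dp0 : PySem.Set Nat :=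
        PySem.Set.ofList [PySem.List.pyGetD first 0 0, PySem.List.pyGetD first 24 0]
      let dp := rest.foldl (fun dp sh =>
        PySem.Set.ofList (dp.flatMap (fun pre =>
          ((pvCal n sh).filter (fun aft => pre &&& aft == 0)).map (fun aft => pre ||| aft)))) dp0
      decide (dp.length > 0)

-- ===== PORT B =====
-- dfs(blocks, mask): True when no blocks remain, else try each orientation of the head block
def pvDfs (n : Nat) : List (List String) → Nat → Bool
  | [], _ => true
  | sh :: t, mask => (pvCal n sh).any (fun o => mask &&& o == 0 && pvDfs n t (mask ||| o))

def composeCube_alt (shapes : List (List String)) : Bool :=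
  match shapes with
  | [] => false     -- outside Pre_
  | s0 :: rest =>
    let n := s0.length
    let target : Int := 2 * n * n + 2 * n * ((n : Int) - 2) + 2 * ((n : Int) - 2) * ((n : Int) - 2)
    let ones : Int := (s0 :: rest).foldl
      (fun acc sh => acc + ((sh.map String.toList).flatten.count '1' : Int)) 0
    if ones ≠ target then false
    else
      let first := pvCal n s0
      [PySem.List.pyGetD first 0 0, PySem.List.pyGetD first 24 0].any (fun o =>
        (0 : Nat) &&& o == 0 && pvDfs n rest ((0 : Nat) ||| o))

-- ===== PRECONDITION & SPEC =====
-- Pre_ excludes the empty list (shapes[0] raises IndexError) and, additionally, ragged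
-- inputs (some block with fewer than n = len(shapes[0]) rows, or a short row among its
-- first n) whose total '1'-count matches the surface area: cal() raises IndexError on the
-- ragged block except when the dp set has already run dry, and in that lazy case both
-- programs return False anyway (Pre_ is slightly narrower than A's exact raise set).
def Pre_composeCube (shapes : List (List String)) : Prop :=
  shapes ≠ [] ∧
  (let n := (shapes.headD []).length
   ((shapes.map (fun sh => ((sh.map String.toList).flatten.count '1' : Int))).sum ≠
      2 * n * n + 2 * n * ((n : Int) - 2) + 2 * ((n : Int) - 2) * ((n : Int) - 2))
   ∨ ∀ sh ∈ shapes, n ≤ sh.length ∧ ∀ row ∈ sh.take n, n ≤ row.toList.length)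
instance (shapes : List (List String)) : Decidable (Pre_composeCube shapes) := by
  unfold Pre_composeCube; infer_instance

def pvWitness_composeCube : List (List String) := [["1"]]

def Spec_composeCube (shapes : List (List String)) (out : Bool) : Prop := out = composeCube_alt shapes
instance (shapes : List (List String)) (out : Bool) : Decidable (Spec_composeCube shapes out) := by unfold Spec_composeCube; infer_instance

-- ===== CLAIM (what is proved, stated in full; the proofs are below) =====
def Claim_equal_composeCube : Prop := ∀ (shapes : List (List String)), Dom_composeCube shapes → Pre_composeCube shapes → Spec_composeCube shapes (composeCube shapes)

-- ===== LEMMAS AND PROOFS =====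

-- the dp set after folding the remaining blocks is nonempty iff the backtracking dfs
-- succeeds starting from some mask of the current list
theorem pv_dp_iff_dfs (n : Nat) (t : List (List String)) :
    ∀ (s : List Nat),
      (0 < (t.foldl (fun dp sh =>
        PySem.Set.ofList (dp.flatMap (fun pre =>
          ((pvCal n sh).filter (fun aft => pre &&& aft == 0)).map (fun aft => pre ||| aft)))) s).length)
      ↔ ∃ m ∈ s, pvDfs n t m = true := by
  induction t with
  | nil =>
    intro s
    simp [pvDfs, List.length_pos_iff_exists_mem]
  | cons sh t ih =>
    intro s
    rw [List.foldl_cons, ih]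
    constructor
    · rintro ⟨m, hm, hd⟩
      rw [PySem.Set.mem_ofList] at hm
      simp only [List.mem_flatMap, List.mem_map, List.mem_filter] at hm
      obtain ⟨pre, hpre, aft, ⟨haft, hdisj⟩, rfl⟩ := hm
      refine ⟨pre, hpre, ?_⟩
      simp only [pvDfs, List.any_eq_true]
      exact ⟨aft, haft, by simp [hdisj, hd]⟩
    · rintro ⟨m, hm, hd⟩
      simp only [pvDfs, List.any_eq_true, Bool.and_eq_true] at hd
      obtain ⟨o, ho, hdisj, hrec⟩ := hd
      refine ⟨m ||| o, ?_, hrec⟩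
      rw [PySem.Set.mem_ofList]
      simp only [List.mem_flatMap, List.mem_map, List.mem_filter]
      exact ⟨m, hm, o, ⟨ho, hdisj⟩, rfl⟩

-- ===== VERDICT (by name: the statement is the Claim_ definition above) =====
theorem composeCube_spec : Claim_equal_composeCube := by
  intro shapes _ _
  unfold Spec_composeCube
  cases shapes with
  | nil => rfl
  | cons s0 rest =>
    simp only [composeCube, composeCube_alt]
    split
    · rfl
    · rw [Bool.eq_iff_iff]
      rw [decide_eq_true_eq, gt_iff_lt, pv_dp_iff_dfs]
      simp only [List.any_eq_true, PySem.Set.mem_ofList, Nat.zero_and, Nat.zero_or,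
        beq_self_eq_true, Bool.true_and]
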